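-- pv_equiv track=rewrite | github.com/ZainMehmood123/HealthRAG | app.py | extract_field_from_text
-- ===== SOURCE A (Python) =====
-- def extract_field_from_text(text, field):
--     """Extract a specific field (e.g., Symptoms, Risk Factors) from the document text and simplify it."""
--     lines = text.split("\n")
--     for line in lines:
--         if line.startswith(f"{field}:"):
--             content = line[len(f"{field}:"):].strip()
--             content = content.split(";")[0].strip()
--             content = content.replace("Typical: ", "").replace("Less typical: ", "")
--             content = content.replace(", ", ", ").replace(". ", ", ")
--             return content
--     return "Not available"
-- ===== SOURCE B (Python) =====
-- def extract_field_from_text(text, field):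
--     """Extract a specific field from the document text and simplify it.
--
--     Scans the raw text directly: checks the field label at the current
--     line start and jumps to the next line via find, never building a
--     list of lines."""
--     prefix = field + ":"
--     rest = text
--     content = None
--     while content is None:
--         if rest.startswith(prefix):
--             body = rest[len(prefix):]
--             end = body.find("\n")
--             content = body if end == -1 else body[:end]
--         else:
--             cut = rest.find("\n")
--             if cut == -1:
--                 return "Not available"
--             rest = rest[cut + 1:]
--     content = content.strip().split(";")[0].strip()
--     return (content.replace("Typical: ", "")
--                    .replace("Less typical: ", "")
--                    .replace(", ", ", ")
--                    .replace(". ", ", "))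
-- ===== Notes on version B (the rewrite author's own statement) =====
-- stated objective: alternative
-- what changed: B never builds the list of lines: it scans the raw text, testing the field label with startswith at the current line start and jumping straight past the next newline located by str.find, instead of A's split("\n") followed by a loop over the lines; the cleanup chain is unchanged.
-- outside the precondition, e.g. on extract_field_from_text('a\nb: x', 'a\nb'): A returns 'Not available', B returns 'x'
import Mathlib
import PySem

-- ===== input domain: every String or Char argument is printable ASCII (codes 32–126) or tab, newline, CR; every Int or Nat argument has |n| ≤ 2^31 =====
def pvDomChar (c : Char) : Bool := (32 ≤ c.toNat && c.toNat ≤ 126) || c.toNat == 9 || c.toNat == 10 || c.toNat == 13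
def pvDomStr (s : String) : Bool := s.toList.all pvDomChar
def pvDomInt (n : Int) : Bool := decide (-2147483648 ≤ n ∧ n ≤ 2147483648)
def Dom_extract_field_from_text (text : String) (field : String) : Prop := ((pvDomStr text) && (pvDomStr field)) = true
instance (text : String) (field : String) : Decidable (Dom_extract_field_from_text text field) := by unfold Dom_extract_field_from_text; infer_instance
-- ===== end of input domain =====

-- B scans the raw text with startswith/find instead of building the list of lines; equivalence is about the return value only (neither mutates).

-- ===== PORT A =====
-- the shared cleanup chain of A: strip, first ';' piece, strip, the four replaces
def pvCleanA (content : List Char) : List Char :=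
  let c1 := PySem.Chars.strip content
  let c2 := PySem.Chars.strip ((PySem.Chars.splitOn c1 [';']).headD [])
  let c3 := PySem.Chars.replace c2 "Typical: ".toList []
  let c4 := PySem.Chars.replace c3 "Less typical: ".toList []
  let c5 := PySem.Chars.replace c4 ", ".toList ", ".toList
  PySem.Chars.replace c5 ". ".toList ", ".toList

-- A's for-loop over text.split("\n")
def pvLoopA (pre : List Char) : List (List Char) → List Char
  | [] => "Not available".toList
  | l :: ls =>
    if PySem.Chars.startswith l pre then
      pvCleanA (PySem.List.slice l (some (pre.length : Int)) none)   -- line[len(prefix):]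
    else pvLoopA pre ls

def extract_field_from_text (text : String) (field : String) : String :=
  String.mk (pvLoopA (field.toList ++ [':']) (PySem.Chars.splitOn text.toList ['\n']))

-- ===== PORT B =====
-- B's while-loop: check the label at the current line start, else jump past the next '\n' found by find
def pvScanB (pre : List Char) (rest : List Char) : Option (List Char) :=
  if PySem.Chars.startswith rest pre then
    let body := PySem.List.slice rest (some (pre.length : Int)) none   -- rest[len(prefix):]
    let e := PySem.Chars.find body ['\n']
    some (if e = -1 then body else PySem.List.slice body none (some e))
  else
    if hc : PySem.Chars.find rest ['\n'] = -1 then none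
    else pvScanB pre (PySem.List.slice rest (some (PySem.Chars.find rest ['\n'] + 1)) none)   -- rest[cut+1:]
termination_by rest.length
decreasing_by
  have hnn : 0 ≤ PySem.Chars.find rest ['\n'] := by
    rcases (PySem.Chars.neg_one_le_find rest ['\n']).lt_or_eq with h | h
    · omega
    · exact absurd h.symm hc
  obtain ⟨hpfx, -⟩ := PySem.Chars.find_spec (s := rest) (sub := ['\n']) hnn
  have hlt : (PySem.Chars.find rest ['\n']).toNat < rest.length := by
    have := hpfx.length_le
    simp at this
    omega
  have hcast : PySem.Chars.find rest ['\n'] + 1 = (((PySem.Chars.find rest ['\n']).toNat + 1 : Nat) : Int) := by omega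
  rw [hcast, PySem.List.slice_from_natCast]
  simp
  omega

-- B's cleanup chain (same operations, written as one pipeline)
def pvCleanB (content : List Char) : List Char :=
  let c := PySem.Chars.strip ((PySem.Chars.splitOn (PySem.Chars.strip content) [';']).headD [])
  PySem.Chars.replace (PySem.Chars.replace (PySem.Chars.replace (PySem.Chars.replace c "Typical: ".toList []) "Less typical: ".toList []) ", ".toList ", ".toList) ". ".toList ", ".toList

def extract_field_from_text_alt (text : String) (field : String) : String :=
  match pvScanB (field.toList ++ [':']) text.toList with
  | none => "Not available"
  | some content => String.mk (pvCleanB content)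

-- ===== PRECONDITION & SPEC =====
-- Pre_ excludes only the degenerate corner where the label contains a newline AND "field:" occurs at a line start of the
-- text: there A's per-line startswith can never match (it returns "Not available") while B's raw-text match spans the
-- newline — a label no caller would pass, and both behaviours defensible.
def Pre_extract_field_from_text (text : String) (field : String) : Prop :=
  '\n' ∈ field.toList →
    (PySem.Chars.startswith text.toList (field.toList ++ [':']) = false ∧
     PySem.Chars.isIn ('\n' :: (field.toList ++ [':'])) text.toList = false)
instance (text : String) (field : String) : Decidable (Pre_extract_field_from_text text field) := by unfold Pre_extract_field_from_text; infer_instance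
def pvWitness_extract_field_from_text : String × String := ("Symptoms: fever; cough\nRisk: age", "Symptoms")

def Spec_extract_field_from_text (text : String) (field : String) (out : String) : Prop := out = extract_field_from_text_alt text field
instance (text : String) (field : String) (out : String) : Decidable (Spec_extract_field_from_text text field out) := by unfold Spec_extract_field_from_text; infer_instance

-- ===== CLAIM (what is proved, stated in full; the proofs are below) =====
def Claim_equal_extract_field_from_text : Prop := ∀ (text : String) (field : String), Dom_extract_field_from_text text field → Pre_extract_field_from_text text field → Spec_extract_field_from_text text field (extract_field_from_text text field)

-- ===== LEMMAS AND PROOFS =====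

-- reference splitter: Python's text.split("\n") as structural recursion
def pvSplitNl (cs : List Char) : List (List Char) :=
  if _h : '\n' ∈ cs then
    cs.takeWhile (· != '\n') :: pvSplitNl ((cs.dropWhile (· != '\n')).tail)
  else [cs]
termination_by cs.length
decreasing_by
  have hne : cs.dropWhile (· != '\n') ≠ [] := by
    intro hnil
    have := List.dropWhile_eq_nil_iff.mp hnil _ _h
    simp at this
  have h1 : (cs.dropWhile (· != '\n')).length ≤ cs.length := cs.length_dropWhile_le _
  have h2 : 0 < (cs.dropWhile (· != '\n')).length := List.length_pos_iff.mpr hne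
  simp only [List.length_tail]
  omega

theorem pvSplitNl_cons_nl (rest : List Char) : pvSplitNl ('\n' :: rest) = [] :: pvSplitNl rest := by
  rw [pvSplitNl]
  simp

theorem pvSplitNl_cons_ne (c : Char) (rest : List Char) (hc : c ≠ '\n') :
    pvSplitNl (c :: rest) = (pvSplitNl rest).modifyHead (c :: ·) := by
  conv_lhs => rw [pvSplitNl]
  conv_rhs => rw [pvSplitNl]
  by_cases hm : '\n' ∈ rest <;>
    simp [hc, Ne.symm hc, hm]

theorem pv_go_cons (fuel : Nat) (c : Char) (rest cur : List Char) (acc : List (List Char)) :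
    PySem.Chars.splitOn.go ['\n'] (fuel+1) (c :: rest) cur acc =
      if c = '\n' then PySem.Chars.splitOn.go ['\n'] fuel rest [] (cur.reverse :: acc)
      else PySem.Chars.splitOn.go ['\n'] fuel rest (c :: cur) acc := by
  rw [PySem.Chars.splitOn.go]
  by_cases h : '\n' = c
  · subst h; simp [List.isPrefixOf]
  · have h1 : (['\n'].isPrefixOf (c::rest)) = false := by
      simp [List.isPrefixOf]; exact fun h' => h h'
    rw [h1]
    simp [if_neg (fun h' : c = '\n' => h h'.symm)]

theorem pv_go_nil (fuel : Nat) (cur : List Char) (acc : List (List Char)) :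
    PySem.Chars.splitOn.go ['\n'] (fuel+1) [] cur acc = (cur.reverse :: acc).reverse := by
  rw [PySem.Chars.splitOn.go]
  exact fun h => absurd h (by omega)

theorem pv_go_eq (fuel : Nat) : ∀ (l cur : List Char) (acc : List (List Char)), l.length < fuel →
    PySem.Chars.splitOn.go ['\n'] fuel l cur acc
      = acc.reverse ++ (pvSplitNl l).modifyHead (cur.reverse ++ ·) := by
  induction fuel with
  | zero => intro l cur acc h; omega
  | succ n ih =>
    intro l cur acc h
    match l with
    | [] =>
      rw [pv_go_nil, pvSplitNl]
      simp
    | c :: rest =>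
      rw [pv_go_cons]
      by_cases hc : c = '\n'
      · subst hc
        rw [ih rest [] _ (by simpa using h), pvSplitNl_cons_nl]
        cases pvSplitNl rest <;> simp
      · rw [ih rest (c :: cur) acc (by simpa using h), pvSplitNl_cons_ne c rest hc]
        cases pvSplitNl rest <;> simp [hc]

theorem pv_splitOn_nl (cs : List Char) : PySem.Chars.splitOn cs ['\n'] = pvSplitNl cs := by
  have h2 : List.modifyHead (fun x : List Char => x) (pvSplitNl cs) = pvSplitNl cs := by
    cases pvSplitNl cs <;> simp
  have := pv_go_eq (cs.length + 1) cs [] [] (by omega)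
  simpa [PySem.Chars.splitOn, h2] using this

-- find with the single-character needle '\n'
theorem pv_find_go_nl : ∀ (cs : List Char) (k : Nat),
    PySem.Chars.find.go ['\n'] cs k
      = if '\n' ∈ cs then ((k + (cs.takeWhile (· != '\n')).length : Nat) : Int) else -1 := by
  intro cs
  induction cs with
  | nil => intro k; rw [PySem.Chars.find.go]; simp
  | cons c rest ih =>
    intro k
    rw [PySem.Chars.find.go]
    by_cases hc : c = '\n'
    · subst hc; simp [List.isPrefixOf]
    · have h1 : (['\n'].isPrefixOf (c::rest)) = false := by
        simp [List.isPrefixOf]; exact fun h' => hc h'.symm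
      rw [h1]
      simp only [Bool.false_eq_true, if_false, ih (k+1)]
      by_cases hm : '\n' ∈ rest
      · simp [hm, Ne.symm hc, hc]
        omega
      · simp [hm, Ne.symm hc]

theorem pv_find_nl (cs : List Char) :
    PySem.Chars.find cs ['\n'] = if '\n' ∈ cs then (((cs.takeWhile (· != '\n')).length : Nat) : Int) else -1 := by
  have := pv_find_go_nl cs 0
  simpa [PySem.Chars.find] using this

theorem pv_pfx_takeWhile (p : Char → Bool) (l m : List Char) (h : l <+: m) (h2 : ∀ x ∈ l, p x) : l <+: m.takeWhile p := by
  induction l generalizing m with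
  | nil => simp
  | cons a t ih =>
    obtain ⟨r, hr⟩ := h
    subst hr
    simp only [List.cons_append, List.takeWhile_cons, h2 a (by simp)]
    exact List.cons_prefix_cons.mpr ⟨rfl, ih (t ++ r) ⟨r, rfl⟩ (fun x hx => h2 x (by simp [hx]))⟩

theorem pv_drop_takeWhile (p : Char → Bool) (l m : List Char) (h2 : ∀ x ∈ l, p x) :
    ((l ++ m).takeWhile p).drop l.length = m.takeWhile p := by
  induction l with
  | nil => simp
  | cons a t ih => simp [h2 a (by simp), ih (fun x hx => h2 x (by simp [hx]))]

-- A's startswith on the first line agrees with B's startswith on the raw text (label has no newline)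
theorem pv_startswith_takeWhile (pre cs : List Char) (hq : ∀ x ∈ pre, (x != '\n') = true) :
    PySem.Chars.startswith (cs.takeWhile (· != '\n')) pre = PySem.Chars.startswith cs pre := by
  simp only [PySem.Chars.startswith]
  rw [Bool.eq_iff_iff]
  simp only [List.isPrefixOf_iff_prefix]
  exact ⟨fun h => h.trans (List.takeWhile_prefix _),
         fun h => pv_pfx_takeWhile _ pre cs h hq⟩

theorem pv_dropWhile_eq_drop (p : Char → Bool) (l : List Char) :
    l.drop (l.takeWhile p).length = l.dropWhile p := by
  induction l with
  | nil => simp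
  | cons a t ih =>
    by_cases h : p a <;> simp [h, ih]

theorem pv_cleanAB (c : List Char) : pvCleanA c = pvCleanB c := rfl

-- the no-newline case: one line, no recursion on either side
theorem pv_main_nonl (pre cs : List Char) (hm : '\n' ∉ cs) :
    pvLoopA pre (pvSplitNl cs)
      = (match pvScanB pre cs with
         | none => "Not available".toList
         | some c => pvCleanA c) := by
  rw [pvSplitNl, dif_neg hm, pvScanB]
  have hb : '\n' ∉ cs.drop pre.length := fun h => hm (List.mem_of_mem_drop h)
  have hfb : PySem.Chars.find (cs.drop pre.length) ['\n'] = -1 := by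
    rw [pv_find_nl, if_neg hb]
  have hf : PySem.Chars.find cs ['\n'] = -1 := by rw [pv_find_nl, if_neg hm]
  by_cases hS : PySem.Chars.startswith cs pre
  · rw [pvLoopA]
    simp [hS, PySem.List.slice_from_natCast, hfb]
  · rw [pvLoopA]
    simp [hS, hf]
    rw [pvLoopA]
    decide

-- the heart: A's loop over the split lines computes B's raw-text scan
theorem pv_main_aux (pre : List Char) (hp : ∀ c ∈ pre, c ≠ '\n') :
    ∀ (n : Nat) (cs : List Char), cs.length ≤ n →
      pvLoopA pre (pvSplitNl cs)
        = (match pvScanB pre cs with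
           | none => "Not available".toList
           | some c => pvCleanA c) := by
  have hq : ∀ x ∈ pre, (x != '\n') = true := fun x hx => by simpa using hp x hx
  intro n
  induction n with
  | zero =>
    intro cs hle
    have : cs = [] := List.length_eq_zero_iff.mp (Nat.le_zero.mp hle)
    subst this
    exact pv_main_nonl pre [] (by simp)
  | succ n ih =>
    intro cs hle
    by_cases hm : '\n' ∈ cs
    · -- cs = tw ++ '\n'-headed rest; both sides examine the first line
      have hsplit : pvSplitNl cs
          = cs.takeWhile (· != '\n') :: pvSplitNl ((cs.dropWhile (· != '\n')).tail) := by
        rw [pvSplitNl, dif_pos hm]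
      have hfind : PySem.Chars.find cs ['\n']
          = (((cs.takeWhile (· != '\n')).length : Nat) : Int) := by
        rw [pv_find_nl, if_pos hm]
      have hdw_ne : cs.dropWhile (· != '\n') ≠ [] := by
        intro hnil
        have := List.dropWhile_eq_nil_iff.mp hnil _ hm
        simp at this
      have hdw_len : (cs.dropWhile (· != '\n')).length ≤ cs.length := cs.length_dropWhile_le _
      have hdw_pos : 0 < (cs.dropWhile (· != '\n')).length := List.length_pos_iff.mpr hdw_ne
      rw [hsplit, pvScanB, pvLoopA, pv_startswith_takeWhile pre cs hq]
      by_cases hS : PySem.Chars.startswith cs pre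
      · -- the label matches: contents agree
        obtain ⟨m, hmeq⟩ := List.isPrefixOf_iff_prefix.mp hS
        have hmm : '\n' ∈ m := by
          rcases List.mem_append.mp (hmeq ▸ hm) with h | h
          · exact absurd rfl (hp _ h)
          · exact h
        have hbody : PySem.List.slice cs (some ((pre.length : Nat) : Int)) none = m := by
          rw [PySem.List.slice_from_natCast, ← hmeq, List.drop_left]
        have hfm : PySem.Chars.find m ['\n']
            = (((m.takeWhile (· != '\n')).length : Nat) : Int) := by
          rw [pv_find_nl, if_pos hmm]
        have hcont : (cs.takeWhile (· != '\n')).drop pre.length = m.takeWhile (· != '\n') := by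
          rw [← hmeq]
          exact pv_drop_takeWhile _ pre m hq
        have htake : m.take (m.takeWhile (· != '\n')).length = m.takeWhile (· != '\n') :=
          (List.prefix_iff_eq_take.mp (List.takeWhile_prefix _)).symm
        simp only [hS, if_pos, hbody, hfm]
        rw [PySem.List.slice_from_natCast]
        have hne : (((m.takeWhile (· != '\n')).length : Nat) : Int) ≠ -1 := by
          omega
        rw [if_neg hne, PySem.List.slice_to_natCast, htake, hcont]
      · -- no match on this line: both sides move past the first '\n'
        have htail : PySem.List.slice cs (some (PySem.Chars.find cs ['\n'] + 1)) none
            = (cs.dropWhile (· != '\n')).tail := by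
          rw [hfind]
          have : ((((cs.takeWhile (· != '\n')).length : Nat) : Int) + 1)
              = (((cs.takeWhile (· != '\n')).length + 1 : Nat) : Int) := by omega
          rw [this, PySem.List.slice_from_natCast, ← List.drop_drop,
            pv_dropWhile_eq_drop, List.drop_one]
        have hfne : PySem.Chars.find cs ['\n'] ≠ -1 := by
          rw [hfind]; omega
        simp only [hS, Bool.false_eq_true, if_false, dif_neg hfne, htail]
        exact ih _ (by simp [List.length_tail]; omega)
    · exact pv_main_nonl pre cs hm

theorem pv_main (pre : List Char) (hp : ∀ c ∈ pre, c ≠ '\n') (cs : List Char) :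
    pvLoopA pre (pvSplitNl cs)
      = (match pvScanB pre cs with
         | none => "Not available".toList
         | some c => pvCleanA c) :=
  pv_main_aux pre hp cs.length cs le_rfl

-- a split line never contains '\n'
theorem pvSplitNl_no_nl : ∀ (n : Nat) (cs : List Char), cs.length ≤ n → ∀ l ∈ pvSplitNl cs, '\n' ∉ l := by
  intro n
  induction n with
  | zero =>
    intro cs hle l hl
    have : cs = [] := List.length_eq_zero_iff.mp (Nat.le_zero.mp hle)
    subst this
    rw [pvSplitNl] at hl
    simp_all
  | succ n ih =>
    intro cs hle l hl
    rw [pvSplitNl] at hl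
    by_cases hm : '\n' ∈ cs
    · rw [dif_pos hm, List.mem_cons] at hl
      rcases hl with hl | hl
      · subst hl
        intro hmem
        have := List.mem_takeWhile_imp hmem
        simp at this
      · have hdw_ne : cs.dropWhile (· != '\n') ≠ [] := by
          intro hnil
          have := List.dropWhile_eq_nil_iff.mp hnil _ hm
          simp at this
        have hdw_len : (cs.dropWhile (· != '\n')).length ≤ cs.length := cs.length_dropWhile_le _
        have hdw_pos : 0 < (cs.dropWhile (· != '\n')).length := List.length_pos_iff.mpr hdw_ne
        exact ih _ (by simp [List.length_tail]; omega) l hl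
    · rw [dif_neg hm] at hl
      simp_all

-- A's loop answers "Not available" once no line can start with the label
theorem pvLoopA_none (pre : List Char) : ∀ ls, (∀ l ∈ ls, PySem.Chars.startswith l pre = false) →
    pvLoopA pre ls = "Not available".toList := by
  intro ls
  induction ls with
  | nil => intro _; rw [pvLoopA]
  | cons l ls ih =>
    intro h
    rw [pvLoopA, h l (by simp)]
    simp
    exact ih (fun x hx => h x (by simp [hx]))

-- B's scan finds nothing when the label occurs at no line start of the text
theorem pvScanB_none (pre text : List Char)
    (hs0 : PySem.Chars.startswith text pre = false)
    (hin : PySem.Chars.isIn ('\n' :: pre) text = false) :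
    ∀ (n : Nat) (rest : List Char), rest.length ≤ n → (rest = text ∨ ('\n' :: rest) <:+ text) →
      pvScanB pre rest = none := by
  intro n
  induction n with
  | zero =>
    intro rest hle hinv
    have hrest : rest = [] := List.length_eq_zero_iff.mp (Nat.le_zero.mp hle)
    subst hrest
    have hpre_ne : pre ≠ [] := by
      intro h
      subst h
      simp [PySem.Chars.startswith, List.isPrefixOf] at hs0
    have hS : PySem.Chars.startswith ([] : List Char) pre = false := by
      cases pre with
      | nil => exact absurd rfl hpre_ne
      | cons a t => simp [PySem.Chars.startswith, List.isPrefixOf]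
    rw [pvScanB, hS]
    have : PySem.Chars.find ([] : List Char) ['\n'] = -1 := by rw [pv_find_nl]; simp
    simp [this]
  | succ n ih =>
    intro rest hle hinv
    have hS : PySem.Chars.startswith rest pre = false := by
      by_cases hp : PySem.Chars.startswith rest pre = true
      · exfalso
        have hpfx : pre <+: rest := List.isPrefixOf_iff_prefix.mp hp
        rcases hinv with h | h
        · subst h
          exact absurd hp (by simp [hs0])
        · have h1 : ('\n' :: pre) <+: ('\n' :: rest) := List.cons_prefix_cons.mpr ⟨rfl, hpfx⟩
          have h2 : ('\n' :: pre) <:+: text := h1.isInfix.trans h.isInfix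
          exact absurd ((PySem.Chars.isIn_iff_infix _ _).mpr h2) (by simp [hin])
      · simpa using hp
    rw [pvScanB, hS]
    simp only [Bool.false_eq_true, if_false]
    by_cases hf : PySem.Chars.find rest ['\n'] = -1
    · simp [hf]
    · have hm : '\n' ∈ rest := by
        by_contra hmm
        exact hf (by rw [pv_find_nl, if_neg hmm])
      have hfind : PySem.Chars.find rest ['\n']
          = (((rest.takeWhile (· != '\n')).length : Nat) : Int) := by
        rw [pv_find_nl, if_pos hm]
      have hdrop : rest.drop (rest.takeWhile (· != '\n')).length = rest.dropWhile (· != '\n') :=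
        pv_dropWhile_eq_drop _ rest
      have hdw_ne : rest.dropWhile (· != '\n') ≠ [] := by
        intro hnil
        have := List.dropWhile_eq_nil_iff.mp hnil _ hm
        simp at this
      have hdw_pos : 0 < (rest.dropWhile (· != '\n')).length := List.length_pos_iff.mpr hdw_ne
      have hdw_len : (rest.dropWhile (· != '\n')).length ≤ rest.length := rest.length_dropWhile_le _
      have hhead : (rest.dropWhile (· != '\n')).head hdw_ne = '\n' := by
        have := List.head_dropWhile_not (· != '\n') hdw_ne
        simpa using this
      have htail : PySem.List.slice rest (some (PySem.Chars.find rest ['\n'] + 1)) none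
          = (rest.dropWhile (· != '\n')).tail := by
        rw [hfind]
        have hc : ((((rest.takeWhile (· != '\n')).length : Nat) : Int) + 1)
            = (((rest.takeWhile (· != '\n')).length + 1 : Nat) : Int) := by omega
        rw [hc, PySem.List.slice_from_natCast, ← List.drop_drop, pv_dropWhile_eq_drop, List.drop_one]
      have hsfx : ('\n' :: (rest.dropWhile (· != '\n')).tail) <:+ text := by
        have h1 : ('\n' :: (rest.dropWhile (· != '\n')).tail) = rest.dropWhile (· != '\n') := by
          conv_rhs => rw [← List.cons_head_tail hdw_ne]
          rw [hhead]
        have h2 : rest.dropWhile (· != '\n') <:+ rest := List.dropWhile_suffix _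
        have h3 : rest <:+ text := by
          rcases hinv with h | h
          · exact h ▸ List.suffix_refl _
          · exact (List.suffix_cons _ _).trans h
        rw [h1]
        exact h2.trans h3
      rw [dif_neg hf, htail]
      exact ih _ (by simp [List.length_tail]; omega) (Or.inr hsfx)

-- ===== VERDICT (by name: the statement is the Claim_ definition above) =====
theorem extract_field_from_text_spec : Claim_equal_extract_field_from_text := by
  intro text field _hdom hpre
  unfold Spec_extract_field_from_text
  unfold extract_field_from_text extract_field_from_text_alt
  by_cases hF : '\n' ∈ field.toList
  · -- label with a newline, admitted only when it occurs at no line start: both answer "Not available"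
    obtain ⟨hs0, hin⟩ := hpre hF
    have hnp : '\n' ∈ field.toList ++ [':'] := List.mem_append.mpr (Or.inl hF)
    have hA : pvLoopA (field.toList ++ [':']) (PySem.Chars.splitOn text.toList ['\n'])
        = "Not available".toList := by
      rw [pv_splitOn_nl]
      refine pvLoopA_none _ _ (fun l hl => ?_)
      have hno := pvSplitNl_no_nl text.toList.length text.toList le_rfl l hl
      by_cases hp : PySem.Chars.startswith l (field.toList ++ [':']) = true
      · exact absurd ((List.isPrefixOf_iff_prefix.mp hp).mem hnp) hno
      · simpa using hp
    have hB : pvScanB (field.toList ++ [':']) text.toList = none :=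
      pvScanB_none _ _ hs0 hin text.toList.length text.toList le_rfl (Or.inl rfl)
    rw [hA, hB]
    rfl
  · have hp : ∀ c ∈ field.toList ++ [':'], c ≠ '\n' := by
      intro c hc
      rcases List.mem_append.mp hc with h | h
      · exact fun he => hF (he ▸ h)
      · simp at h; subst h; decide
    rw [pv_splitOn_nl, pv_main _ hp]
    cases pvScanB (field.toList ++ [':']) text.toList with
    | none => rfl
    | some c => simp [pv_cleanAB]
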